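-- pv_equiv track=rewrite | github.com/ExpertWasCoding/ExpertBot | bot/utils.py | score_calculate
-- ===== SOURCE A (Python) =====
-- def score_calculate(list_of_cards):
--     player_points = 0
--
--     card_values = {
--         "Ace": 14,
--         "King": 13,
--         "Queen": 12,
--         "Jack": 11,
--         "10": 10,
--         "9": 9,
--         "8": 8,
--         "7": 7,
--         "6": 6,
--         "5": 5,
--         "4": 4,
--         "3": 3,
--         "2": 2,
--     }
--
--     rank_counts = {}
--     for card in list_of_cards:
--         value = card.split()[0]
--         rank_counts[value] = rank_counts.get(value, 0) + 1
--
--     for value, count in rank_counts.items():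
--         if count == 4:
--             player_points += 100  # Four of a kind
--         elif count == 3:
--             player_points += 50  # Three of a kind
--         elif count == 2:
--             player_points += 20  # One pair
--         player_points += card_values[value] * count
--
--     return player_points
-- ===== SOURCE B (Python) =====
-- def score_calculate(list_of_cards):
--     card_values = {
--         "Ace": 14, "King": 13, "Queen": 12, "Jack": 11,
--         "10": 10, "9": 9, "8": 8, "7": 7, "6": 6,
--         "5": 5, "4": 4, "3": 3, "2": 2,
--     }
--
--     def go(ranks):
--         # quicksort-style grouping: peel off ALL cards of the head's rank, recurse on the rest
--         if not ranks:
--             return 0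
--         r = ranks[0]
--         n = len([x for x in ranks if x == r])
--         rest = [x for x in ranks if x != r]
--         bonus = 100 if n == 4 else 50 if n == 3 else 20 if n == 2 else 0
--         return card_values[r] * n + bonus + go(rest)
--
--     return go([card.split()[0] for card in list_of_cards])
-- ===== Notes on version B (the rewrite author's own statement) =====
-- stated objective: alternative
-- what changed: Replaces A's two-stage count-dict construction plus if/elif loop over dict items by a quicksort-style grouping recursion: peel off all cards sharing the head's rank, score that whole group at once, then recurse on the remaining cards; no counting dictionary is ever built.
import Mathlib
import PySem

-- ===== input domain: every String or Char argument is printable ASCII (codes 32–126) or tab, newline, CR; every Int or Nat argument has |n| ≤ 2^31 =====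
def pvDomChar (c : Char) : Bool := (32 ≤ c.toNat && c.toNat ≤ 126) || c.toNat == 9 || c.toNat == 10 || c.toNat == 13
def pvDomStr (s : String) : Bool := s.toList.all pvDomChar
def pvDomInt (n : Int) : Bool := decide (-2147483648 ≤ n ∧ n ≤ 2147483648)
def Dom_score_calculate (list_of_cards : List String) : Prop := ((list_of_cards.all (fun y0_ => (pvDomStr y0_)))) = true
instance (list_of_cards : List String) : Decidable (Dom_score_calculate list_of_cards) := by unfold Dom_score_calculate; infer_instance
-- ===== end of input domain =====

-- B replaces A's count-dict + loop over dict items by a quicksort-style grouping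
-- recursion: peel off ALL cards of the head's rank, score that group, recurse on the
-- rest ("alternative" decomposition; no speed claim).


-- shared helpers: the card_values table both sources write out, and card.split()[0]
def cardValues : PySem.Dict String Int :=
  PySem.Dict.ofList [("Ace", 14), ("King", 13), ("Queen", 12), ("Jack", 11),
    ("10", 10), ("9", 9), ("8", 8), ("7", 7), ("6", 6), ("5", 5), ("4", 4), ("3", 3), ("2", 2)]

def pvRank (card : String) : String := PySem.List.pyGetD (PySem.Str.split₀ card) 0 ""

-- ===== PORT A =====
def score_calculate (list_of_cards : List String) : Int :=
  let rank_counts : PySem.Dict String Int :=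
    list_of_cards.foldl (fun d card =>
      let value := pvRank card
      d.insert value (d.getD value 0 + 1)) PySem.Dict.empty
  rank_counts.items.foldl (fun player_points p =>
      let player_points :=
        if p.2 = 4 then player_points + 100
        else if p.2 = 3 then player_points + 50
        else if p.2 = 2 then player_points + 20
        else player_points
      player_points + cardValues.getD p.1 0 * p.2) 0

-- ===== PORT B =====
-- quicksort-style grouping: peel off all copies of the head's rank, recurse on the rest
def pvGo (ranks : List String) : Int :=
  match ranks with
  | [] => 0
  | r :: t =>
    let n : Int := (((r :: t).filter (fun x => x == r)).length : Int)
    let rest := (r :: t).filter (fun x => x != r)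
    let bonus : Int := if n = 4 then 100 else if n = 3 then 50 else if n = 2 then 20 else 0
    cardValues.getD r 0 * n + bonus + pvGo rest
termination_by ranks.length
decreasing_by
  simp only [List.filter_cons]
  have h : (r != r) = false := by simp
  rw [h]
  exact Nat.lt_succ_of_le (List.length_filter_le _ _)

def score_calculate_alt (list_of_cards : List String) : Int :=
  pvGo (list_of_cards.map pvRank)

-- ===== PRECONDITION & SPEC =====
-- Pre_ excludes exactly the inputs where Python A raises: a card whose .split() is empty
-- (IndexError) or whose first word is not a listed rank (KeyError in card_values[value]).
def Pre_score_calculate (list_of_cards : List String) : Prop :=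
  ∀ card ∈ list_of_cards,
    (PySem.Str.split₀ card).headD "" ∈
      (["Ace", "King", "Queen", "Jack", "10", "9", "8", "7", "6", "5", "4", "3", "2"] : List String)
instance (list_of_cards : List String) : Decidable (Pre_score_calculate list_of_cards) := by
  unfold Pre_score_calculate; infer_instance

def pvWitness_score_calculate : List String :=
  ["Ace of Spades", "King of Hearts", "Ace of Clubs"]

def Spec_score_calculate (list_of_cards : List String) (out : Int) : Prop := out = score_calculate_alt list_of_cards
instance (list_of_cards : List String) (out : Int) : Decidable (Spec_score_calculate list_of_cards out) := by unfold Spec_score_calculate; infer_instance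

-- ===== CLAIM (what is proved, stated in full; the proofs are below) =====
def Claim_equal_score_calculate : Prop := ∀ (list_of_cards : List String), Dom_score_calculate list_of_cards → Pre_score_calculate list_of_cards → Spec_score_calculate list_of_cards (score_calculate list_of_cards)

-- ===== LEMMAS AND PROOFS =====

-- the score contributed by one rank r occurring n times
def pvF (l : List String) (r : String) : Int :=
  cardValues.getD r 0 * (l.count r : Int) +
    (if (l.count r : Int) = 4 then 100 else if (l.count r : Int) = 3 then 50
     else if (l.count r : Int) = 2 then 20 else 0)

lemma filter_eq_count (r : String) (l : List String) :
    ((l.filter (fun x => x == r)).length : Int) = (l.count r : Int) := by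
  simp [List.count_eq_countP, List.countP_eq_length_filter]

lemma count_filter_ne (l : List String) (r x : String) (hx : x ≠ r) :
    (l.filter (fun y => y != r)).count x = l.count x := by
  induction l with
  | nil => rfl
  | cons a t ih =>
    by_cases ha : a = r
    · rw [List.filter_cons, if_neg (by simp [ha]), ih, List.count_cons]
      have hax : (a == x) = false := by subst ha; simp [Ne.symm hx]
      simp [hax]
    · rw [List.filter_cons, if_pos (by simp [ha]), List.count_cons, List.count_cons, ih]

lemma pvGo_eq_sum : ∀ (n : Nat) (l : List String), l.length ≤ n →
    pvGo l = ∑ r ∈ l.toFinset, pvF l r := by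
  intro n
  induction n with
  | zero =>
    intro l hl
    have : l = [] := List.eq_nil_of_length_eq_zero (Nat.le_zero.mp hl)
    subst this; simp [pvGo]
  | succ n ih =>
    intro l hl
    match l with
    | [] => simp [pvGo]
    | r :: t =>
      rw [pvGo]
      have hrest_len : ((r :: t).filter (fun x => x != r)).length ≤ n := by
        simp only [List.filter_cons]
        have h : (r != r) = false := by simp
        rw [h]
        exact le_trans (List.length_filter_le _ _) (Nat.lt_succ_iff.mp hl)
      rw [ih _ hrest_len]
      have hfin : ((r :: t).filter (fun x => x != r)).toFinset = (r :: t).toFinset.erase r := by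
        ext x
        simp [Finset.mem_erase, and_comm]
      rw [hfin]
      have hsum :
          ∑ x ∈ (r :: t).toFinset.erase r, pvF ((r :: t).filter (fun y => y != r)) x
            = ∑ x ∈ (r :: t).toFinset.erase r, pvF (r :: t) x := by
        apply Finset.sum_congr rfl
        intro x hx
        have hxr : x ≠ r := (Finset.mem_erase.mp hx).1
        unfold pvF
        rw [count_filter_ne _ _ _ hxr]
      rw [hsum]
      have hr : r ∈ (r :: t).toFinset := by simp
      rw [← Finset.add_sum_erase _ _ hr]
      congr 1
      unfold pvF
      rw [← filter_eq_count r (r :: t)]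

lemma dedup_sum_eq_finset (l : List String) (g : String → Int) :
    ((PySem.List.dedup l).map g).sum = ∑ r ∈ l.toFinset, g r := by
  have hnd : (PySem.List.dedup l).Nodup := PySem.List.nodup_dedup l
  have hfs : (PySem.List.dedup l).toFinset = l.toFinset := by
    ext x; simp only [List.mem_toFinset, PySem.List.mem_dedup]
  rw [← List.sum_toFinset _ hnd, hfs]

-- ===== VERDICT (by name: the statement is the Claim_ definition above) =====
theorem score_calculate_spec : Claim_equal_score_calculate := by
  intro l _ _
  unfold Spec_score_calculate score_calculate score_calculate_alt
  simp only []
  have hdict :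
      l.foldl (fun d card => let value := pvRank card; d.insert value (d.getD value 0 + 1))
        PySem.Dict.empty
        = PySem.Dict.counter (l.map pvRank) := by
    rw [← PySem.Dict.foldl_insert_getD_add_one_eq_counter, List.foldl_map]
  have hbody :
      (fun (player_points : Int) (p : String × Int) =>
        let player_points :=
          if p.2 = 4 then player_points + 100
          else if p.2 = 3 then player_points + 50
          else if p.2 = 2 then player_points + 20
          else player_points
        player_points + cardValues.getD p.1 0 * p.2)
      = fun (player_points : Int) (p : String × Int) =>
          player_points + (cardValues.getD p.1 0 * p.2 +
            (if p.2 = 4 then 100 else if p.2 = 3 then 50 else if p.2 = 2 then 20 else 0)) := by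
    funext pp p
    split_ifs <;> ring
  rw [hdict, hbody, PySem.List.foldl_add, PySem.Dict.items_counter, zero_add, List.map_map]
  have hmap :
      ((fun (p : String × Int) => cardValues.getD p.1 0 * p.2 +
          (if p.2 = 4 then 100 else if p.2 = 3 then 50 else if p.2 = 2 then 20 else 0)) ∘
        fun k => (k, ((l.map pvRank).count k : Int)))
        = pvF (l.map pvRank) := by
    funext k; simp [Function.comp, pvF]
  rw [show PySem.Set.ofList (l.map pvRank) = PySem.List.dedup (l.map pvRank) from
        (PySem.List.dedup_eq_ofList _).symm] at *
  rw [hmap, dedup_sum_eq_finset]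
  exact (pvGo_eq_sum (l.map pvRank).length _ le_rfl).symm
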